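-- pv_equiv track=rewrite | github.com/fmented/Image2MIDI | image2midi/image2melody.py | get_octave
-- ===== SOURCE A (Python) =====
-- def get_octave(l, lo, hi):
--     final =[]
--     multi=0
--     for x in l:
--         while x+ (12*multi) < hi:
--             g=x + (12*multi)
--             if g > lo:
--                 final.append(g)
--             multi+=1
--         multi=0
--     return final
-- ===== SOURCE B (Python) =====
-- def get_octave(l, lo, hi):
--     out = []
--     for x in l:
--         # first m >= 0 with x + 12*m > lo, first m with x + 12*m >= hi
--         m_start = max(0, (lo - x) // 12 + 1)
--         m_end = -((x - hi) // 12)  # = ceil((hi - x) / 12)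
--         for m in range(m_start, m_end):
--             out.append(x + 12 * m)
--     return out
-- ===== Notes on version B (the rewrite author's own statement) =====
-- stated objective: faster
-- what changed: Instead of scanning multipliers one by one from 0 for each element (skipping those below lo), B computes the first and last valid multiplier in closed form with floor division and iterates only over the values actually appended.
import Mathlib
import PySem

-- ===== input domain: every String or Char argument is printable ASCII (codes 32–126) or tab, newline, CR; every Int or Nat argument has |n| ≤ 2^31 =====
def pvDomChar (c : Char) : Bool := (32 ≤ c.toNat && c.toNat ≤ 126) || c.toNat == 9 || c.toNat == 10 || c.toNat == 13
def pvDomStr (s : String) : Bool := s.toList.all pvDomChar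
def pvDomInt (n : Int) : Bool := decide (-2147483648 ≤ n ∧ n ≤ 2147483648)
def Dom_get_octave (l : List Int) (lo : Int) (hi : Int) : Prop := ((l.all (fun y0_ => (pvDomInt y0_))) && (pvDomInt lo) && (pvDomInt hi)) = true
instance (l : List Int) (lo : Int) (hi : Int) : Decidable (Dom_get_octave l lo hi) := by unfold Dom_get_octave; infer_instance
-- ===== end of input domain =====

-- B replaces A's per-element scan of all multipliers from 0 by a closed-form
-- computation of the first/last valid multiplier (objective: faster).

-- ===== PORT A =====
-- A's inner `while x + 12*multi < hi` loop: appends x+12*multi when it exceeds lo,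
-- then increments multi; terminates because hi - (x+12*multi) strictly decreases.
def innerA (lo hi x multi : Int) (acc : List Int) : List Int :=
  if _h : x + 12 * multi < hi then
    innerA lo hi x (multi + 1)
      (if x + 12 * multi > lo then acc ++ [x + 12 * multi] else acc)
  else acc
termination_by (hi - (x + 12 * multi)).toNat
decreasing_by omega

def get_octave (l : List Int) (lo : Int) (hi : Int) : List Int :=
  l.foldl (fun final x => innerA lo hi x 0 final) []

-- ===== PORT B =====
def get_octave_alt (l : List Int) (lo : Int) (hi : Int) : List Int :=
  l.foldl (fun out x =>
    (PySem.List.pyRange (max 0 (PySem.Int.floordiv (lo - x) 12 + 1))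
        (-(PySem.Int.floordiv (x - hi) 12)) 1).foldl
      (fun out m => out ++ [x + 12 * m]) out) []

-- ===== PRECONDITION & SPEC =====
def Spec_get_octave (l : List Int) (lo : Int) (hi : Int) (out : List Int) : Prop := out = get_octave_alt l lo hi
instance (l : List Int) (lo : Int) (hi : Int) (out : List Int) : Decidable (Spec_get_octave l lo hi out) := by unfold Spec_get_octave; infer_instance

-- ===== CLAIM (what is proved, stated in full; the proofs are below) =====
def Claim_equal_get_octave : Prop := ∀ (l : List Int) (lo : Int) (hi : Int), Dom_get_octave l lo hi → Spec_get_octave l lo hi (get_octave l lo hi)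

-- ===== LEMMAS AND PROOFS =====

theorem foldl_append_singleton (f : Int → Int) (L : List Int) (acc : List Int) :
    L.foldl (fun acc m => acc ++ [f m]) acc = acc ++ L.map f := by
  induction L generalizing acc with
  | nil => simp
  | cons a t ih => simp [List.foldl_cons, ih]

theorem innerA_eq (lo hi x : Int) (m : Int) (acc : List Int) :
    innerA lo hi x m acc =
      acc ++ (PySem.List.pyRange (max m (PySem.Int.floordiv (lo - x) 12 + 1))
        (-(PySem.Int.floordiv (x - hi) 12)) 1).map (fun k => x + 12 * k) := by
  simp only [PySem.Int.floordiv_eq_ediv_of_pos (show (0:Int) < 12 by norm_num)]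
  have hq1 : 12 * ((lo - x) / 12) + (lo - x) % 12 = lo - x := Int.mul_ediv_add_emod _ _
  have hr1 : 0 ≤ (lo - x) % 12 ∧ (lo - x) % 12 < 12 :=
    ⟨Int.emod_nonneg _ (by omega), Int.emod_lt_of_pos _ (by omega)⟩
  have hq2 : 12 * ((x - hi) / 12) + (x - hi) % 12 = x - hi := Int.mul_ediv_add_emod _ _
  have hr2 : 0 ≤ (x - hi) % 12 ∧ (x - hi) % 12 < 12 :=
    ⟨Int.emod_nonneg _ (by omega), Int.emod_lt_of_pos _ (by omega)⟩
  fun_induction innerA lo hi x m acc with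
  | case1 m acc h ih =>
    split at ih <;> rename_i hg
    · -- x + 12*m > lo : m is the next emitted multiplier
      rw [if_pos hg, max_eq_left (by omega), PySem.List.pyRange_one_cons (by omega),
        List.map_cons, ih, max_eq_left (by omega)]
      simp
    · -- x + 12*m ≤ lo : m is skipped
      rw [if_neg hg, ih, max_eq_right (by omega), max_eq_right (by omega)]
  | case2 m acc h =>
    rw [PySem.List.pyRange_one_eq_nil (by omega)]
    simp

theorem foldl_step (lo hi : Int) (t : List Int) (acc : List Int) :
    List.foldl (fun final x => innerA lo hi x 0 final) acc t =
    List.foldl (fun out x =>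
      (PySem.List.pyRange (max 0 (PySem.Int.floordiv (lo - x) 12 + 1))
          (-(PySem.Int.floordiv (x - hi) 12)) 1).foldl
        (fun out m => out ++ [x + 12 * m]) out) acc t := by
  induction t generalizing acc with
  | nil => rfl
  | cons y s ihs =>
    simp only [List.foldl_cons]
    rw [innerA_eq, foldl_append_singleton, ihs]

theorem get_octave_eq_alt (l : List Int) (lo : Int) (hi : Int) :
    get_octave l lo hi = get_octave_alt l lo hi := by
  unfold get_octave get_octave_alt
  exact foldl_step lo hi l []

-- ===== VERDICT (by name: the statement is the Claim_ definition above) =====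
theorem get_octave_spec : Claim_equal_get_octave := by
  intro l lo hi _
  unfold Spec_get_octave
  exact get_octave_eq_alt l lo hi
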